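-- pv_equiv track=rewrite | github.com/Pitambarbittu/newEQfiles | python assignment/assignment-2/q5.py | daily_participants
-- ===== SOURCE A (Python) =====
-- def daily_participants(pp_list):
--     dicty = {}
--     list = []
--     answer = []
--     for p in range(len(pp_list)):
--         list.append(0)
--     for p in range(len(pp_list)):
--         for i in range(len(pp_list[p])):
--             if pp_list[p][i] not in dicty:
--                 dicty[pp_list[p][i]] = 0
--
--     for name in dicty:
--         flag = 0
--         for p in range(len(pp_list)):
--             if name not in pp_list[p]:
--                 flag = 1
--         if flag is 0:
--             answer.append(name)
--
--     return answer
-- ===== SOURCE B (Python) =====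
-- def daily_participants(pp_list):
--     if not pp_list:
--         return []
--     common = set(pp_list[0])
--     for day in pp_list[1:]:
--         common &= set(day)
--     answer = []
--     seen = set()
--     for name in pp_list[0]:
--         if name in common and name not in seen:
--             answer.append(name)
--             seen.add(name)
--     return answer
-- ===== Notes on version B (the rewrite author's own statement) =====
-- stated objective: faster
-- what changed: A builds a dict of all names and re-scans every day's list for each name (a per-name all-day membership scan); B folds a set intersection over the days once and then makes a single ordered dedup pass over the first day.
import Mathlib
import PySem

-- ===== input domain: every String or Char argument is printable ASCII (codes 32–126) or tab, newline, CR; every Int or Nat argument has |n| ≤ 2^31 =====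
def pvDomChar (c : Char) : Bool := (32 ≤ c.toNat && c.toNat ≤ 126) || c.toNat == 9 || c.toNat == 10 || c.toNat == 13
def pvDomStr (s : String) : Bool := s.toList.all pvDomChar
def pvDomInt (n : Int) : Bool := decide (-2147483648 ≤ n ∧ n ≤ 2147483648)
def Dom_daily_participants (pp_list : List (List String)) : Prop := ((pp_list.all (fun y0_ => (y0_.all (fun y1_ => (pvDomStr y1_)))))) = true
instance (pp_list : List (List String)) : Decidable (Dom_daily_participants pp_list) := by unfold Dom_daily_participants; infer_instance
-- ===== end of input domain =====

-- B replaces A's per-name scan of every day with one set-intersection fold plus a single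
-- ordered dedup pass over the first day (objective: faster).

-- ===== PORT A =====
-- A's dict build: insert each name (value 0) when not yet present.
-- (A's local variable `list` — a list of zeros — is never read; it is omitted.)
def pvDictyA (pp_list : List (List String)) : PySem.Dict String Int :=
  pp_list.foldl
    (fun d day => day.foldl (fun d n => if d.contains n = false then d.insert n 0 else d) d)
    PySem.Dict.empty

-- A's inner flag loop: set to 1 whenever a day misses the name.
def pvFlagA (pp_list : List (List String)) (name : String) : Int :=
  pp_list.foldl (fun flag day => if day.contains name = false then 1 else flag) 0

def daily_participants (pp_list : List (List String)) : List String :=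
  (pvDictyA pp_list).keys.foldl
    (fun answer name => if pvFlagA pp_list name = 0 then answer ++ [name] else answer)
    []

-- ===== PORT B =====
-- B's intersection fold: common = set(day0); for day in rest: common &= set(day)
def pvCommonB (d0 : List String) (rest : List (List String)) : PySem.Set String :=
  rest.foldl (fun c day => PySem.Set.inter c (PySem.Set.ofList day)) (PySem.Set.ofList d0)

def daily_participants_alt (pp_list : List (List String)) : List String :=
  match pp_list with
  | [] => []
  | d0 :: rest =>
    (d0.foldl
      (fun (acc : List String × PySem.Set String) name =>
        if PySem.Set.contains (pvCommonB d0 rest) name && !(PySem.Set.contains acc.2 name) then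
          (acc.1 ++ [name], PySem.Set.add acc.2 name)
        else acc)
      ([], PySem.Set.empty)).1

-- ===== PRECONDITION & SPEC =====
def Spec_daily_participants (pp_list : List (List String)) (out : List String) : Prop := out = daily_participants_alt pp_list
instance (pp_list : List (List String)) (out : List String) : Decidable (Spec_daily_participants pp_list out) := by unfold Spec_daily_participants; infer_instance

-- ===== CLAIM (what is proved, stated in full; the proofs are below) =====
def Claim_equal_daily_participants : Prop := ∀ (pp_list : List (List String)), Dom_daily_participants pp_list → Spec_daily_participants pp_list (daily_participants pp_list)

-- ===== LEMMAS AND PROOFS =====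

-- keys of A's conditional-insert dict loop: ordered set update
theorem keysA_loop (l : List String) (d : PySem.Dict String Int) :
    (l.foldl (fun d n => if d.contains n = false then d.insert n 0 else d) d).keys
      = PySem.Set.update d.keys l := by
  induction l generalizing d with
  | nil => rfl
  | cons n t ih =>
    simp only [List.foldl_cons]
    show _ = PySem.Set.update (PySem.Set.add d.keys n) t
    have hck : PySem.Set.contains d.keys n = d.contains n := by
      rw [PySem.Dict.contains_eq_decide_mem_keys]
      simp [PySem.Set.contains]
    cases hc : d.contains n with
    | false =>
      rw [if_pos rfl, ih]
      have h2 : PySem.Set.contains d.keys n = false := by rw [hck, hc]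
      have hk : PySem.Set.add d.keys n = (d.insert n 0).keys := by
        rw [PySem.Dict.keys_insert_of_not_contains d 0 hc]
        simp only [PySem.Set.add, h2]
        simp
      rw [hk]
    | true =>
      rw [if_neg (by simp [hc]), ih]
      have h2 : PySem.Set.contains d.keys n = true := by rw [hck, hc]
      have hk : PySem.Set.add d.keys n = d.keys := by
        simp only [PySem.Set.add, h2]
        simp
      rw [hk]

-- A's flag loop result: 0 iff every day contains the name
theorem flagA_char (pp : List (List String)) (name : String) (i : Int) :
    pp.foldl (fun flag day => if day.contains name = false then (1 : Int) else flag) i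
      = if pp.all (fun day => day.contains name) then i else 1 := by
  induction pp generalizing i with
  | nil => simp
  | cons d t ih =>
    simp only [List.foldl_cons, List.all_cons]
    rcases Bool.eq_false_or_eq_true (d.contains name) with hc | hc <;> simp only [hc]
    · rw [if_neg (by simp), ih]
      simp
    · rw [if_pos trivial, ih]
      simp

-- A computes: filter "in every day" over the first-occurrence dedup of all names
theorem A_char (pp : List (List String)) :
    daily_participants pp
      = (PySem.Set.ofList pp.flatten).filter (fun name => pp.all (fun day => day.contains name)) := by
  unfold daily_participants pvDictyA
  rw [List.foldl_flatten.symm]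
  rw [keysA_loop]
  have hkeys : PySem.Set.update (PySem.Dict.empty : PySem.Dict String Int).keys pp.flatten
      = PySem.Set.ofList pp.flatten := by
    rw [PySem.Set.ofList_eq_foldl]; rfl
  rw [hkeys]
  have hcongr := PySem.List.foldl_congr_mem' (PySem.Set.ofList pp.flatten)
    (fun answer name => if pvFlagA pp name = 0 then answer ++ [name] else answer)
    (fun answer name =>
      if pp.all (fun day => day.contains name) then answer ++ [name] else answer)
    []
    (by
      intro name _ acc
      show (if pvFlagA pp name = 0 then acc ++ [name] else acc)
        = (if pp.all (fun day => day.contains name) then acc ++ [name] else acc)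
      unfold pvFlagA
      rw [flagA_char]
      rcases Bool.eq_false_or_eq_true (pp.all (fun day => day.contains name)) with h | h <;>
        simp only [h] <;> simp)
  rw [hcongr, PySem.List.foldl_append_if_eq_filter]
  simp

-- filter over an ordered set update splits off hseq: the new names kept by P
def hseq (P : String → Bool) : List String → PySem.Set String → List String
  | [], _ => []
  | n :: t, s =>
    if !(PySem.Set.contains s n) && P n then n :: hseq P t (PySem.Set.add s n)
    else hseq P t (PySem.Set.add s n)

-- B's output loop as a recursion (seen collects only appended names)
def gseq (P : String → Bool) : List String → PySem.Set String → List String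
  | [], _ => []
  | n :: t, seen =>
    if P n && !(PySem.Set.contains seen n) then n :: gseq P t (PySem.Set.add seen n)
    else gseq P t seen

theorem hseq_cons (P : String → Bool) (n : String) (t : List String) (s : PySem.Set String) :
    hseq P (n :: t) s =
      if !(PySem.Set.contains s n) && P n then n :: hseq P t (PySem.Set.add s n)
      else hseq P t (PySem.Set.add s n) := rfl

theorem gseq_cons (P : String → Bool) (n : String) (t : List String) (s : PySem.Set String) :
    gseq P (n :: t) s =
      if P n && !(PySem.Set.contains s n) then n :: gseq P t (PySem.Set.add s n)
      else gseq P t s := rfl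

theorem filter_update_eq (P : String → Bool) (l : List String) (s : PySem.Set String) :
    (PySem.Set.update s l).filter P = s.filter P ++ hseq P l s := by
  induction l generalizing s with
  | nil => simp [hseq, PySem.Set.update]
  | cons n t ih =>
    show (PySem.Set.update (PySem.Set.add s n) t).filter P = _
    rw [ih, hseq_cons]
    cases hc : PySem.Set.contains s n with
    | true =>
      have hadd : PySem.Set.add s n = s := by simp only [PySem.Set.add, hc]; simp
      rw [hadd, if_neg (by simp)]
    | false =>
      have hadd : PySem.Set.add s n = s ++ [n] := by simp only [PySem.Set.add, hc]; simp
      cases hp : P n with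
      | true =>
        rw [if_pos (by simp [hc, hp]), hadd]
        simp [List.filter_append, hp]
      | false =>
        rw [if_neg (by simp [hp]), hadd]
        simp [List.filter_append, hp]

theorem h_eq_g (P : String → Bool) (l : List String) (s s' : PySem.Set String)
    (hss : ∀ n, P n = true → (n ∈ s ↔ n ∈ s')) :
    hseq P l s = gseq P l s' := by
  induction l generalizing s s' with
  | nil => rfl
  | cons n t ih =>
    rw [hseq_cons, gseq_cons]
    cases hp : P n with
    | false =>
      rw [if_neg (by simp [hp]), if_neg (by simp [hp])]
      apply ih
      intro m hm
      have hmn : m ≠ n := by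
        intro h
        subst h
        rw [hm] at hp
        exact absurd hp (by decide)
      rw [PySem.Set.mem_add]
      constructor
      · rintro (h | h)
        · exact (hss m hm).1 h
        · exact absurd h hmn
      · intro h
        exact Or.inl ((hss m hm).2 h)
    | true =>
      have hcc : PySem.Set.contains s n = PySem.Set.contains s' n := by
        simp only [PySem.Set.contains]
        rw [Bool.eq_iff_iff]
        simp [hss n hp]
      rw [hcc]
      cases hc : PySem.Set.contains s' n with
      | true =>
        have hsadd : PySem.Set.add s n = s := by
          have h1 : PySem.Set.contains s n = true := by rw [hcc, hc]
          simp only [PySem.Set.add, h1]; simp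
        rw [if_neg (by simp), if_neg (by simp)]
        rw [hsadd]
        exact ih s s' hss
      | false =>
        rw [if_pos (by simp [hp]), if_pos (by simp [hp])]
        congr 1
        apply ih
        intro m hm
        rw [PySem.Set.mem_add, PySem.Set.mem_add, hss m hm]

-- B's foldl over (answer, seen) equals gseq
theorem Bloop (Q : String → Bool) (l : List String) (r : List String) (s : PySem.Set String) :
    (l.foldl
      (fun (acc : List String × PySem.Set String) n =>
        if Q n && !(PySem.Set.contains acc.2 n) then (acc.1 ++ [n], PySem.Set.add acc.2 n)
        else acc)
      (r, s)).1 = r ++ gseq Q l s := by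
  induction l generalizing r s with
  | nil => simp [gseq]
  | cons n t ih =>
    simp only [List.foldl_cons]
    rw [gseq_cons]
    cases hb : Q n && !(PySem.Set.contains s n) with
    | true =>
      rw [if_pos rfl, if_pos rfl, ih]
      simp
    | false =>
      rw [if_neg (by decide), if_neg (by decide), ih]

-- membership in B's intersection fold
theorem commonC (rest : List (List String)) (c : PySem.Set String) (n : String) :
    n ∈ rest.foldl (fun c day => PySem.Set.inter c (PySem.Set.ofList day)) c
      ↔ n ∈ c ∧ rest.all (fun day => day.contains n) = true := by
  induction rest generalizing c with
  | nil => simp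
  | cons d t ih =>
    simp only [List.foldl_cons, List.all_cons]
    rw [ih]
    simp [PySem.Set.inter, PySem.Set.contains, List.mem_filter, PySem.Set.mem_ofList,
      and_assoc]

theorem filter_update_of_subset (P : String → Bool) (l : List String) (s : PySem.Set String)
    (h : ∀ n, P n = true → n ∈ s) :
    (PySem.Set.update s l).filter P = s.filter P := by
  induction l generalizing s with
  | nil => rfl
  | cons n t ih =>
    show (PySem.Set.update (PySem.Set.add s n) t).filter P = _
    rw [ih (PySem.Set.add s n) (fun m hm => (PySem.Set.mem_add s n m).2 (Or.inl (h m hm)))]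
    cases hc : PySem.Set.contains s n with
    | true =>
      have hadd : PySem.Set.add s n = s := by simp only [PySem.Set.add, hc]; simp
      rw [hadd]
    | false =>
      have hadd : PySem.Set.add s n = s ++ [n] := by simp only [PySem.Set.add, hc]; simp
      have hpn : P n = false := by
        cases hp : P n with
        | false => rfl
        | true => exact absurd (h n hp) (by simpa using hc)
      rw [hadd]
      simp [List.filter_append, hpn]

-- ===== VERDICT (by name: the statement is the Claim_ definition above) =====
theorem daily_participants_spec : Claim_equal_daily_participants := by
  intro pp _
  show daily_participants pp = daily_participants_alt pp
  cases pp with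
  | nil => rfl
  | cons d0 rest =>
    rw [A_char]
    show _ = (d0.foldl
      (fun (acc : List String × PySem.Set String) name =>
        if PySem.Set.contains (pvCommonB d0 rest) name && !(PySem.Set.contains acc.2 name) then
          (acc.1 ++ [name], PySem.Set.add acc.2 name)
        else acc)
      ([], PySem.Set.empty)).1
    rw [Bloop]
    have hflat : (d0 :: rest).flatten = d0 ++ rest.flatten := rfl
    have hof : PySem.Set.ofList (d0 ++ rest.flatten)
        = PySem.Set.update (PySem.Set.ofList d0) rest.flatten := by
      rw [PySem.Set.ofList_eq_foldl, PySem.Set.ofList_eq_foldl, List.foldl_append]; rfl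
    have hsub : ∀ n, (fun name => (d0 :: rest).all (fun day => day.contains name)) n = true →
        n ∈ PySem.Set.ofList d0 := by
      intro n hn
      simp only [List.all_cons, Bool.and_eq_true] at hn
      rw [PySem.Set.mem_ofList]
      simpa using hn.1
    rw [hflat, hof, filter_update_of_subset _ _ _ hsub]
    have hfe : (PySem.Set.ofList d0).filter
        (fun name => (d0 :: rest).all (fun day => day.contains name))
        = hseq (fun name => (d0 :: rest).all (fun day => day.contains name)) d0 [] := by
      have h := filter_update_eq (fun name => (d0 :: rest).all (fun day => day.contains name)) d0 []
      have h0 : PySem.Set.update ([] : PySem.Set String) d0 = PySem.Set.ofList d0 := by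
        rw [PySem.Set.ofList_eq_foldl]; rfl
      rw [h0] at h
      simpa using h
    rw [hfe, h_eq_g _ d0 [] [] (fun _ _ => Iff.rfl)]
    have hQ : PySem.Set.contains (pvCommonB d0 rest)
        = (fun name => (d0 :: rest).all (fun day => day.contains name)) := by
      funext n
      have hmem := commonC rest (PySem.Set.ofList d0) n
      simp only [PySem.Set.mem_ofList] at hmem
      simp only [PySem.Set.contains, pvCommonB, List.all_cons]
      rw [Bool.eq_iff_iff]
      simp [hmem]
    rw [hQ]
    simp [PySem.Set.empty]
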